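-- pv_equiv track=rewrite | github.com/karthikcpatel/CrackDSA | BarRaiser.py | find_flaky_tests
-- ===== SOURCE A (Python) =====
-- def find_flaky_tests(test_results):
--
--     result_map = {}
--     for test_id, status in test_results:
--         if test_id not in result_map:
--             result_map[test_id] = set()
--         result_map[test_id].add(status)
--
--     flaky_tests = []
--     for test_id, statutes in result_map.items():
--         if len(statutes) > 1:
--             flaky_tests.append(test_id)
--
--     return flaky_tests
-- ===== SOURCE B (Python) =====
-- def find_flaky_tests(test_results):
--     first_status = {}
--     order = []
--     flaky = set()
--     for test_id, status in test_results:
--         if test_id not in first_status: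
--             first_status[test_id] = status
--             order.append(test_id)
--         elif status != first_status[test_id]:
--             flaky.add(test_id)
--     return [tid for tid in order if tid in flaky]
-- ===== Notes on version B (the rewrite author's own statement) =====
-- stated objective: simpler
-- what changed: Instead of building a full set of statuses per test id and counting them afterwards in a second pass over the map, B keeps only each id's first-seen status plus a flaky membership set, detecting a second distinct status on the fly in one pass, then filters the first-occurrence order list.
import Mathlib
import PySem

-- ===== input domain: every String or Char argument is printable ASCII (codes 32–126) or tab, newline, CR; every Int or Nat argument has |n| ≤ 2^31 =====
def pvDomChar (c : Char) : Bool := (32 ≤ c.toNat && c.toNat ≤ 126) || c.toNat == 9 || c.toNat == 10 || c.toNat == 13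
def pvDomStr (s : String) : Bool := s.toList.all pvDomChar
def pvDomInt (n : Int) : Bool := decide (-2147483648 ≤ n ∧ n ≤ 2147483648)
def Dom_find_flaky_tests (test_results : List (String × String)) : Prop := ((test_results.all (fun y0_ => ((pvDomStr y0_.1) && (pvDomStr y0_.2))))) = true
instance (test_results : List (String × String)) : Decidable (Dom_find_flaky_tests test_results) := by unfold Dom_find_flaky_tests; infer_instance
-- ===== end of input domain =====

-- B replaces A's per-id status sets (counted in a second pass over the map) by one pass keeping
-- each id's first-seen status plus a flaky membership set; objective: simpler.

-- ===== PORT A =====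
-- loop body of A's first 'for': 'if test_id not in result_map: result_map[test_id] = set()',
-- then 'result_map[test_id].add(status)' (the modify default Set.empty is never read: the key
-- is always present at that point)
def stepA_find_flaky_tests (d : PySem.Dict String (PySem.Set String)) (p : String × String) :
    PySem.Dict String (PySem.Set String) :=
  let d' := if d.contains p.1 = false then d.insert p.1 PySem.Set.empty else d
  d'.modify p.1 PySem.Set.empty (fun s => PySem.Set.add s p.2)

def find_flaky_tests (test_results : List (String × String)) : List String :=
  let result_map := test_results.foldl stepA_find_flaky_tests PySem.Dict.empty
  result_map.items.foldl
    (fun flaky_tests kv => if 1 < PySem.Set.len kv.2 then flaky_tests ++ [kv.1] else flaky_tests) []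

-- ===== PORT B =====
-- loop body of B: state = (first_status, order, flaky); 'test_id not in first_status' and the
-- later 'first_status[test_id]' lookup are the match on get?
def stepB_find_flaky_tests (st : PySem.Dict String String × List String × PySem.Set String)
    (p : String × String) : PySem.Dict String String × List String × PySem.Set String :=
  match st.1.get? p.1 with
  | none => (st.1.insert p.1 p.2, st.2.1 ++ [p.1], st.2.2)
  | some fs => if fs ≠ p.2 then (st.1, st.2.1, PySem.Set.add st.2.2 p.1) else st

def find_flaky_tests_alt (test_results : List (String × String)) : List String :=
  let st := test_results.foldl stepB_find_flaky_tests (PySem.Dict.empty, [], PySem.Set.empty)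
  st.2.1.filter (fun tid => PySem.Set.contains st.2.2 tid)

-- ===== PRECONDITION & SPEC =====
def Spec_find_flaky_tests (test_results : List (String × String)) (out : List String) : Prop := out = find_flaky_tests_alt test_results
instance (test_results : List (String × String)) (out : List String) : Decidable (Spec_find_flaky_tests test_results out) := by unfold Spec_find_flaky_tests; infer_instance

-- ===== CLAIM (what is proved, stated in full; the proofs are below) =====
def Claim_equal_find_flaky_tests : Prop := ∀ (test_results : List (String × String)), Dom_find_flaky_tests test_results → Spec_find_flaky_tests test_results (find_flaky_tests test_results)

-- ===== LEMMAS AND PROOFS =====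

-- invariant linking A's status-set map to B's (first_status, order, flaky) after the same prefix
def InvFFT (d : PySem.Dict String (PySem.Set String)) (f : PySem.Dict String String)
    (order : List String) (fl : PySem.Set String) : Prop :=
  d.keys = order ∧
  f.keys = order ∧
  order.Nodup ∧
  (∀ k ∈ fl, k ∈ order) ∧
  ∀ p ∈ d.items, ∃ fs, f.get? p.1 = some fs ∧ fs ∈ p.2 ∧ (1 < p.2.length ↔ p.1 ∈ fl)

lemma one_lt_length_of_two_mem {α : Type} {s : List α} {a b : α}
    (ha : a ∈ s) (hb : b ∈ s) (hne : a ≠ b) : 1 < s.length := by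
  match s with
  | [] => cases ha
  | [x] =>
      simp only [List.mem_singleton] at ha hb
      exact absurd (ha.trans hb.symm) hne
  | x :: y :: t => simp only [List.length_cons]; omega

lemma invFFT_step (d : PySem.Dict String (PySem.Set String)) (f : PySem.Dict String String)
    (order : List String) (fl : PySem.Set String) (tid st : String)
    (h : InvFFT d f order fl) :
    InvFFT (stepA_find_flaky_tests d (tid, st))
      (stepB_find_flaky_tests (f, order, fl) (tid, st)).1
      (stepB_find_flaky_tests (f, order, fl) (tid, st)).2.1
      (stepB_find_flaky_tests (f, order, fl) (tid, st)).2.2 := by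
  obtain ⟨hdk, hfk, hnd, hfl, hpt⟩ := h
  have hndd : d.keys.Nodup := hdk ▸ hnd
  by_cases hc : tid ∈ order
  · -- key already present in both maps
    have hdc : d.contains tid = true := (PySem.Dict.contains_iff_mem_keys d tid).mpr (hdk ▸ hc)
    obtain ⟨s, hs⟩ : ∃ s, d.get? tid = some s := by
      have := PySem.Dict.contains_eq_isSome_get? d tid
      rw [hdc] at this
      exact Option.isSome_iff_exists.mp this.symm
    have hmem : (tid, s) ∈ d.items := PySem.Dict.mem_items_of_get?_eq_some d hs
    obtain ⟨fs, hfs, hfsmem, hiff⟩ := hpt (tid, s) hmem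
    -- A's step rewrites the entry at tid to s.add st
    have hA : stepA_find_flaky_tests d (tid, st) = d.insert tid (PySem.Set.add s st) := by
      simp only [stepA_find_flaky_tests, hdc, Bool.true_eq_false, ite_false,
        PySem.Dict.modify, PySem.Dict.getD_of_get?_eq_some d PySem.Set.empty hs]
    have hitems : (stepA_find_flaky_tests d (tid, st)).items
        = d.items.map (fun p => if p.1 == tid then (tid, PySem.Set.add s st) else p) := by
      rw [hA, PySem.Dict.items_insert_of_contains d _ hdc]
    -- an item whose key is tid IS (tid, s)
    have huniq : ∀ p ∈ d.items, p.1 = tid → p = (tid, s) := by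
      intro p hp hp1
      have : d.get? p.1 = some p.2 := PySem.Dict.get?_of_mem_items d hp hndd
      rw [hp1, hs] at this
      obtain rfl := Option.some.injEq .. ▸ this.symm
      exact Prod.ext hp1 rfl
    have hkeysA : (stepA_find_flaky_tests d (tid, st)).keys = order := by
      rw [hA, PySem.Dict.keys_insert_of_contains d _ hdc, hdk]
    by_cases hne : fs = st
    · -- same status as first seen: both states are unchanged
      have hadd : PySem.Set.add s st = s := by
        have hmem' : st ∈ s := by rw [← hne]; exact hfsmem
        simp [PySem.Set.add, hmem']
      have hAeq : stepA_find_flaky_tests d (tid, st) = d := by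
        apply PySem.Dict.ext
        rw [hitems, hadd]
        conv_rhs => rw [← List.map_id d.items]
        apply List.map_congr_left
        intro p hp
        by_cases hp1 : p.1 = tid
        · rw [if_pos (beq_iff_eq.mpr hp1)]
          exact (huniq p hp hp1).symm
        · rw [if_neg (by simp [hp1])]
          rfl
      have hB : stepB_find_flaky_tests (f, order, fl) (tid, st) = (f, order, fl) := by
        simp [stepB_find_flaky_tests, hfs, hne]
      rw [hAeq, hB]
      exact ⟨hdk, hfk, hnd, hfl, hpt⟩
    · -- a second distinct status: A's set grows past 1, B marks tid flaky
      have hB : stepB_find_flaky_tests (f, order, fl) (tid, st)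
          = (f, order, PySem.Set.add fl tid) := by
        simp [stepB_find_flaky_tests, hfs, hne]
      rw [hB]
      refine ⟨hkeysA, hfk, hnd, ?_, ?_⟩
      · intro k hk
        rcases (PySem.Set.mem_add fl tid k).mp hk with hk | rfl
        · exact hfl k hk
        · exact hc
      · intro q hq
        rw [hitems] at hq
        obtain ⟨p, hp, rfl⟩ := List.mem_map.mp hq
        by_cases hp1 : p.1 = tid
        · obtain rfl := huniq p hp hp1
          simp only [BEq.rfl, if_true]
          refine ⟨fs, hfs, (PySem.Set.mem_add s st fs).mpr (Or.inl hfsmem), ?_⟩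
        -- both sides true
          constructor
          · intro _; exact (PySem.Set.mem_add fl tid tid).mpr (Or.inr rfl)
          · intro _
            exact one_lt_length_of_two_mem ((PySem.Set.mem_add s st fs).mpr (Or.inl hfsmem))
              ((PySem.Set.mem_add s st st).mpr (Or.inr rfl)) hne
        · simp only [beq_iff_eq, hp1, if_false]
          obtain ⟨fs', h1, h2, h3⟩ := hpt p hp
          refine ⟨fs', h1, h2, ?_⟩
          rw [h3]
          constructor
          · intro hm; exact (PySem.Set.mem_add fl tid p.1).mpr (Or.inl hm)
          · intro hm
            rcases (PySem.Set.mem_add fl tid p.1).mp hm with hm | hm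
            · exact hm
            · exact absurd hm hp1
  · -- fresh key: both append
    have hdc : d.contains tid = false :=
      Bool.eq_false_iff.mpr (fun ht => hc (hdk ▸ (PySem.Dict.contains_iff_mem_keys d tid).mp ht))
    have hfc : f.contains tid = false :=
      Bool.eq_false_iff.mpr (fun ht => hc (hfk ▸ (PySem.Dict.contains_iff_mem_keys f tid).mp ht))
    have hfg : f.get? tid = none := (PySem.Dict.get?_eq_none_iff_not_mem_keys f tid).mpr (hfk ▸ hc)
    -- A's step appends (tid, {st})
    have hA : stepA_find_flaky_tests d (tid, st)
        = (d.insert tid PySem.Set.empty).insert tid (PySem.Set.add PySem.Set.empty st) := by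
      simp only [stepA_find_flaky_tests, hdc, if_pos, PySem.Dict.modify,
        PySem.Dict.getD_of_get?_eq_some _ PySem.Set.empty
          (PySem.Dict.get?_insert_self d tid PySem.Set.empty)]
    have hitems : (stepA_find_flaky_tests d (tid, st)).items
        = d.items ++ [(tid, PySem.Set.add PySem.Set.empty st)] := by
      rw [hA, PySem.Dict.insert_insert_self, PySem.Dict.items_insert_of_not_contains d _ hdc]
    have hB : stepB_find_flaky_tests (f, order, fl) (tid, st)
        = (f.insert tid st, order ++ [tid], fl) := by
      simp [stepB_find_flaky_tests, hfg]
    rw [hB]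
    refine ⟨?_, ?_, ?_, ?_, ?_⟩
    · rw [hA, PySem.Dict.insert_insert_self,
        PySem.Dict.keys_insert_of_not_contains d _ hdc, hdk]
    · rw [PySem.Dict.keys_insert_of_not_contains f _ hfc, hfk]
    · refine hnd.append (List.nodup_singleton tid) ?_
      intro a ha hb
      simp only [List.mem_singleton] at hb
      exact hc (hb ▸ ha)
    · intro k hk
      exact List.mem_append_left _ (hfl k hk)
    · intro p hp
      rw [hitems] at hp
      rcases List.mem_append.mp hp with hp | hp
      · obtain ⟨fs', h1, h2, h3⟩ := hpt p hp
        have hp1 : p.1 ≠ tid := fun he =>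
          hc (hdk ▸ he ▸ PySem.Dict.mem_keys_of_mem_items d hp)
        refine ⟨fs', ?_, h2, h3⟩
        rw [PySem.Dict.get?_insert_of_ne f st hp1, h1]
      · obtain rfl := List.mem_singleton.mp hp
        refine ⟨st, PySem.Dict.get?_insert_self f tid st, ?_, ?_⟩
        · show st ∈ PySem.Set.add PySem.Set.empty st
          exact (PySem.Set.mem_add _ st st).mpr (Or.inr rfl)
        · show 1 < (PySem.Set.add PySem.Set.empty st).length ↔ tid ∈ fl
          constructor
          · intro hlen
            exact absurd hlen (by simp [PySem.Set.add, PySem.Set.empty, PySem.Set.contains])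
          · intro hm; exact absurd (hfl tid hm) hc

lemma invFFT_fold (l : List (String × String)) (d : PySem.Dict String (PySem.Set String))
    (f : PySem.Dict String String) (order : List String) (fl : PySem.Set String)
    (h : InvFFT d f order fl) :
    InvFFT (l.foldl stepA_find_flaky_tests d)
      (l.foldl stepB_find_flaky_tests (f, order, fl)).1
      (l.foldl stepB_find_flaky_tests (f, order, fl)).2.1
      (l.foldl stepB_find_flaky_tests (f, order, fl)).2.2 := by
  induction l generalizing d f order fl with
  | nil => exact h
  | cons p l ih =>
      simp only [List.foldl_cons]
      have h' := invFFT_step d f order fl p.1 p.2 h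
      have hB : stepB_find_flaky_tests (f, order, fl) p
          = ((stepB_find_flaky_tests (f, order, fl) p).1,
             (stepB_find_flaky_tests (f, order, fl) p).2.1,
             (stepB_find_flaky_tests (f, order, fl) p).2.2) := rfl
      rw [hB]
      exact ih _ _ _ _ h'

lemma filter_map_eq (items : List (String × PySem.Set String)) (fl : PySem.Set String)
    (h : ∀ p ∈ items, (1 < p.2.length ↔ p.1 ∈ fl)) :
    (items.filter (fun kv => 1 < PySem.Set.len kv.2)).map Prod.fst
      = (items.map Prod.fst).filter (fun tid => PySem.Set.contains fl tid) := by
  induction items with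
  | nil => rfl
  | cons p l ih =>
      have hp := h p List.mem_cons_self
      have ih' := ih (fun q hq => h q (List.mem_cons_of_mem _ hq))
      simp only [List.map_cons, List.filter_cons, PySem.Set.len, PySem.Set.contains,
        List.contains_eq_mem, Nat.one_lt_cast] at ih' ⊢
      by_cases hlen : 1 < p.2.length
      · have hfl : p.1 ∈ fl := hp.mp hlen
        simp [hlen, hfl, ih']
      · have hfl : p.1 ∉ fl := fun hm => hlen (hp.mpr hm)
        simp [hlen, hfl, ih']

-- ===== VERDICT (by name: the statement is the Claim_ definition above) =====
theorem find_flaky_tests_spec : Claim_equal_find_flaky_tests := by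
  intro tr _
  unfold Spec_find_flaky_tests
  have hinit : InvFFT PySem.Dict.empty PySem.Dict.empty [] PySem.Set.empty :=
    ⟨rfl, rfl, List.nodup_nil, fun k hk => absurd hk List.not_mem_nil,
      fun p hp => absurd hp List.not_mem_nil⟩
  obtain ⟨hkeys, -, -, -, hpt⟩ :=
    invFFT_fold tr PySem.Dict.empty PySem.Dict.empty [] PySem.Set.empty hinit
  have hAdef : find_flaky_tests tr
      = ((tr.foldl stepA_find_flaky_tests PySem.Dict.empty).items).foldl
          (fun flaky_tests kv =>
            if 1 < PySem.Set.len kv.2 then flaky_tests ++ [kv.1] else flaky_tests) [] := rfl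
  have hBdef : find_flaky_tests_alt tr
      = ((tr.foldl stepB_find_flaky_tests (PySem.Dict.empty, [], PySem.Set.empty)).2.1).filter
          (fun tid => PySem.Set.contains
            ((tr.foldl stepB_find_flaky_tests (PySem.Dict.empty, [], PySem.Set.empty)).2.2)
            tid) := rfl
  have hA := PySem.List.foldl_append_if
    (fun kv : String × PySem.Set String => 1 < PySem.Set.len kv.2) Prod.fst
    ((tr.foldl stepA_find_flaky_tests PySem.Dict.empty).items) []
  simp only [List.nil_append, decide_eq_true_eq] at hA
  rw [hAdef, hBdef, hA, filter_map_eq _ _ (fun p hp => by obtain ⟨fs, -, -, h3⟩ := hpt p hp; exact h3)]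
  exact congrArg _ hkeys
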